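-- pv_equiv track=rewrite | github.com/fm-key-lab/ancient_snakemake_analysispy | local_analysis_initial_qc/local_analysis_initial_qc_modules.py | create_ranges
-- ===== SOURCE A (Python) =====
-- def create_ranges(test_p,dist_to_run):
--     # much more efficient version of old check for recombination range creation
--     # including automatic ignoring of redundant ranges
--     # runs in ~O(N) time
--     current_index_limit_leading=0
--     current_index_limit_trailing=0
--     range_to_check_set=set()
--     max_p_index=len(test_p)
--     for position in test_p:
--         # iterate up trailing limit
--         lower_lim=position-dist_to_run
--         while test_p[current_index_limit_trailing] < lower_lim:
--             current_index_limit_trailing +=1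
--         # iterate up leading limit
--         upper_lim=position+dist_to_run
--         while test_p[current_index_limit_leading] < upper_lim:
--             if current_index_limit_leading == max_p_index-1:
--                 break
--             else:
--                 current_index_limit_leading += 1
--         range_to_check_set.add((current_index_limit_trailing,current_index_limit_leading))
--     return range_to_check_set
-- ===== SOURCE B (Python) =====
-- def _bisect_left(a, x):
--     lo, hi = 0, len(a)
--     while lo < hi:
--         mid = (lo + hi) // 2
--         if a[mid] < x:
--             lo = mid + 1
--         else:
--             hi = mid
--     return lo
--
-- def create_ranges(test_p, dist_to_run):
--     # independent binary searches per position instead of a coordinated two-pointer sweep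
--     n = len(test_p)
--     range_to_check_set = set()
--     for position in test_p:
--         trailing = _bisect_left(test_p, position - dist_to_run)
--         leading = min(_bisect_left(test_p, position + dist_to_run), n - 1)
--         range_to_check_set.add((trailing, leading))
--     return range_to_check_set
-- ===== Notes on version B (the rewrite author's own statement) =====
-- stated objective: alternative
-- what changed: Replaces A's coordinated two-pointer sweep with shared mutable trailing/leading indices by an independent hand-written bisect_left binary search per position (no state carried between iterations), capping the leading index at len-1.
-- outside the precondition, e.g. on create_ranges([3, 0], 0): A returns {(0, 0)}, B returns {(2, 1), (0, 0)}; on create_ranges([0], -1): A raises IndexError, B returns {(1, 0)}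
import Mathlib
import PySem

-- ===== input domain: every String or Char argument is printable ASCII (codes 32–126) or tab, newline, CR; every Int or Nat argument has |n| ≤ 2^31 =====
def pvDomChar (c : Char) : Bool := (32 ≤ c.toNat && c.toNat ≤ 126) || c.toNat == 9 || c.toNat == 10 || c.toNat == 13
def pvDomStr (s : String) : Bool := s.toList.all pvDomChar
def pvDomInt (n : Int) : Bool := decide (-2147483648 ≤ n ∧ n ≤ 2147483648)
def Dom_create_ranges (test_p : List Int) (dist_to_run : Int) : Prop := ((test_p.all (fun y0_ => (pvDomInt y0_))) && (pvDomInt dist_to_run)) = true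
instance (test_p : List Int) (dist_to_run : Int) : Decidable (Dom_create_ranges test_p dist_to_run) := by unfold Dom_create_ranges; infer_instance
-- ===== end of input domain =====

-- B replaces A's coordinated two-pointer sweep by an independent hand-written binary search
-- (bisect_left) per position; objective: alternative (same task, different algorithm, not faster).

-- ===== PORT A =====
-- 'while test_p[i] < lim: i += 1'.  Python indexes test_p[i] and raises IndexError once i
-- reaches the end; the port stops there instead — that divergence is only reachable outside
-- Pre_create_ranges (negative dist_to_run), where nothing is claimed.  The fuel argument
-- (always called with fuel = len(xs), enough for the at-most len(xs) steps) only totalizes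
-- the while loop; it changes no computed value.
def pvWhileTF (xs : List Int) (lim : Int) : Nat → Nat → Nat
  | 0, i => i
  | fuel + 1, i =>
    if h : i < xs.length then
      if xs[i] < lim then pvWhileTF xs lim fuel (i + 1) else i
    else i

-- 'while test_p[i] < lim: if i == max_p_index-1: break else: i += 1' (index always in range here)
def pvWhileLF (xs : List Int) (lim : Int) : Nat → Nat → Nat
  | 0, i => i
  | fuel + 1, i =>
    if h : i < xs.length then
      if xs[i] < lim then
        if i = xs.length - 1 then i else pvWhileLF xs lim fuel (i + 1)
      else i
    else i

-- one iteration of A's for-loop over 'position', state = (trailing, leading, set)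
def pvStepA (xs : List Int) (d : Int) (st : Nat × Nat × List (Int × Int)) (position : Int) :
    Nat × Nat × List (Int × Int) :=
  let tr := pvWhileTF xs (position - d) xs.length st.1
  let ld := pvWhileLF xs (position + d) xs.length st.2.1
  (tr, ld, PySem.Set.add st.2.2 ((tr : Int), (ld : Int)))

def create_ranges (test_p : List Int) (dist_to_run : Int) : List (Int × Int) :=
  (test_p.foldl (pvStepA test_p dist_to_run) (0, 0, ([] : List (Int × Int)))).2.2

-- ===== PORT B =====
-- Source B's hand-written _bisect_left loop; 'a[mid]' via pyGet? (mid < hi ≤ len(a) in every call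
-- create_ranges_alt makes, so the none branch is unreachable).  fuel = len(a) ≥ hi - lo bounds
-- the halving loop's steps; it only totalizes the recursion.
def pvBlLoopF (a : List Int) (x : Int) : Nat → Nat → Nat → Nat
  | 0, lo, _ => lo
  | fuel + 1, lo, hi =>
    if lo < hi then
      match PySem.List.pyGet? a (((lo + hi) / 2 : Nat) : Int) with
      | some v => if v < x then pvBlLoopF a x fuel ((lo + hi) / 2 + 1) hi
                  else pvBlLoopF a x fuel lo ((lo + hi) / 2)
      | none => lo
    else lo

def pvBisectLeft (a : List Int) (x : Int) : Nat := pvBlLoopF a x a.length 0 a.length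

-- one iteration of B's for-loop, state = the set
def pvStepB (xs : List Int) (d : Int) (s : List (Int × Int)) (position : Int) :
    List (Int × Int) :=
  let trailing := pvBisectLeft xs (position - d)
  let leading := min (pvBisectLeft xs (position + d)) (xs.length - 1)
  PySem.Set.add s ((trailing : Int), (leading : Int))

def create_ranges_alt (test_p : List Int) (dist_to_run : Int) : List (Int × Int) :=
  test_p.foldl (pvStepB test_p dist_to_run) ([] : List (Int × Int))

-- ===== PRECONDITION & SPEC =====
-- Pre_ excludes unsorted test_p (A's two-pointer state is an accident of iteration order there)
-- and negative dist_to_run (Python A raises IndexError on every nonempty list then; the totalized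
-- port does not consume this conjunct, but Python A returns no value on those inputs).
def Pre_create_ranges (test_p : List Int) (dist_to_run : Int) : Prop :=
  List.Pairwise (· ≤ ·) test_p ∧ 0 ≤ dist_to_run
instance (test_p : List Int) (dist_to_run : Int) : Decidable (Pre_create_ranges test_p dist_to_run) := by unfold Pre_create_ranges; infer_instance
def pvWitness_create_ranges : List Int × Int := ([0, 2, 3, 3, 10], 2)

def Spec_create_ranges (test_p : List Int) (dist_to_run : Int) (out : List (Int × Int)) : Prop := out = create_ranges_alt test_p dist_to_run
instance (test_p : List Int) (dist_to_run : Int) (out : List (Int × Int)) : Decidable (Spec_create_ranges test_p dist_to_run out) := by unfold Spec_create_ranges; infer_instance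

-- ===== CLAIM (what is proved, stated in full; the proofs are below) =====
def Claim_equal_create_ranges : Prop := ∀ (test_p : List Int) (dist_to_run : Int), Dom_create_ranges test_p dist_to_run → Pre_create_ranges test_p dist_to_run → Spec_create_ranges test_p dist_to_run (create_ranges test_p dist_to_run)

-- ===== LEMMAS AND PROOFS =====

-- 'j is the bisect_left insertion point for x in xs'
def lbP (xs : List Int) (x : Int) (j : Nat) : Prop :=
  j ≤ xs.length ∧ (∀ k (hk : k < xs.length), k < j → xs[k] < x) ∧
    (∀ k (hk : k < xs.length), j ≤ k → x ≤ xs[k])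

theorem lbP_unique {xs : List Int} {x : Int} {j j' : Nat}
    (h : lbP xs x j) (h' : lbP xs x j') : j = j' := by
  obtain ⟨hj, hb, ha⟩ := h
  obtain ⟨hj', hb', ha'⟩ := h'
  by_contra hne
  rcases Nat.lt_or_ge j j' with hlt | hge
  · exact absurd (hb' j (by omega) hlt) (not_lt.mpr (ha j (by omega) le_rfl))
  · have hlt : j' < j := by omega
    exact absurd (hb j' (by omega) hlt) (not_lt.mpr (ha' j' (by omega) le_rfl))

theorem sorted_getElem_le {xs : List Int} (hs : List.Pairwise (· ≤ ·) xs)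
    {i j : Nat} (hi : i < xs.length) (hj : j < xs.length) (hij : i ≤ j) : xs[i] ≤ xs[j] := by
  rcases Nat.eq_or_lt_of_le hij with rfl | hlt
  · exact le_rfl
  · exact List.pairwise_iff_getElem.mp hs i j hi hj hlt

theorem pvWhileTF_lbP (xs : List Int) (x : Int) (hs : List.Pairwise (· ≤ ·) xs) :
    ∀ (fuel i : Nat), xs.length ≤ fuel + i → i ≤ xs.length →
      (∀ k (hk : k < xs.length), k < i → xs[k] < x) →
      lbP xs x (pvWhileTF xs x fuel i) := by
  intro fuel
  induction fuel with
  | zero =>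
    intro i hf hi hb
    exact ⟨by simpa [pvWhileTF] using hi, by simpa [pvWhileTF] using hb,
      fun k hk hik => by simp [pvWhileTF] at hik ⊢; omega⟩
  | succ fuel ih =>
    intro i hf hi hb
    by_cases h : i < xs.length
    · rw [pvWhileTF, dif_pos h]
      by_cases hlt : xs[i] < x
      · rw [if_pos hlt]
        refine ih (i + 1) (by omega) (by omega) (fun k hk hki => ?_)
        rcases Nat.lt_succ_iff_lt_or_eq.mp hki with h' | rfl
        · exact hb k hk h'
        · exact hlt
      · rw [if_neg hlt]
        exact ⟨by omega, hb,
          fun k hk hik => le_trans (not_lt.mp hlt) (sorted_getElem_le hs h hk hik)⟩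
    · rw [pvWhileTF, dif_neg h]
      exact ⟨by omega, hb, fun k hk hik => by omega⟩

theorem pvWhileLF_eq (xs : List Int) (x : Int) {j : Nat} (hj : lbP xs x j) :
    ∀ (fuel i : Nat), xs.length ≤ fuel + i → i + 1 ≤ xs.length →
      (∀ k (hk : k < xs.length), k < i → xs[k] < x) →
      pvWhileLF xs x fuel i = min j (xs.length - 1) := by
  intro fuel
  induction fuel with
  | zero => intro i hf hi hb; omega
  | succ fuel ih =>
    intro i hf hi hb
    have h : i < xs.length := by omega
    rw [pvWhileLF, dif_pos h]
    by_cases hlt : xs[i] < x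
    · rw [if_pos hlt]
      have hij : i < j := by
        by_contra hcon
        exact absurd hlt (not_lt.mpr (hj.2.2 i h (by omega)))
      by_cases hlast : i = xs.length - 1
      · rw [if_pos hlast]
        have := hj.1
        omega
      · rw [if_neg hlast]
        refine ih (i + 1) (by omega) (by omega) (fun k hk hki => ?_)
        rcases Nat.lt_succ_iff_lt_or_eq.mp hki with h' | rfl
        · exact hb k hk h'
        · exact hlt
    · rw [if_neg hlt]
      have h1 : i ≤ j := by
        by_contra hcon
        exact absurd (hb j (by omega) (by omega)) (not_lt.mpr (hj.2.2 j (by omega) le_rfl))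
      have h2 : ¬ i < j := fun hij => absurd (hj.2.1 i h hij) hlt
      omega

theorem pvBlLoopF_lbP (xs : List Int) (x : Int) (hs : List.Pairwise (· ≤ ·) xs) :
    ∀ (fuel lo hi : Nat), hi - lo ≤ fuel → lo ≤ hi → hi ≤ xs.length →
      (∀ k (hk : k < xs.length), k < lo → xs[k] < x) →
      (∀ k (hk : k < xs.length), hi ≤ k → x ≤ xs[k]) →
      lbP xs x (pvBlLoopF xs x fuel lo hi) := by
  intro fuel
  induction fuel with
  | zero =>
    intro lo hi hf hlh hhl hb ha
    exact ⟨by simpa [pvBlLoopF] using by omega, by simpa [pvBlLoopF] using hb,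
      fun k hk hlk => ha k hk (by simp [pvBlLoopF] at hlk; omega)⟩
  | succ fuel ih =>
    intro lo hi hf hlh hhl hb ha
    by_cases hlt : lo < hi
    · rw [pvBlLoopF, if_pos hlt]
      have hmid : (lo + hi) / 2 < xs.length := by omega
      rw [PySem.List.pyGet?_natCast, List.getElem?_eq_getElem hmid]
      dsimp only
      by_cases hvx : xs[(lo + hi) / 2] < x
      · rw [if_pos hvx]
        refine ih ((lo + hi) / 2 + 1) hi (by omega) (by omega) hhl (fun k hk hki => ?_) ha
        exact lt_of_le_of_lt (sorted_getElem_le hs hk hmid (by omega)) hvx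
      · rw [if_neg hvx]
        refine ih lo ((lo + hi) / 2) (by omega) (by omega) (by omega) hb (fun k hk hmk => ?_)
        exact le_trans (not_lt.mp hvx) (sorted_getElem_le hs hmid hk hmk)
    · rw [pvBlLoopF, if_neg hlt]
      exact ⟨by omega, hb, fun k hk hlk => ha k hk (by omega)⟩

theorem pvBisectLeft_lbP (xs : List Int) (x : Int) (hs : List.Pairwise (· ≤ ·) xs) :
    lbP xs x (pvBisectLeft xs x) :=
  pvBlLoopF_lbP xs x hs xs.length 0 xs.length (by omega) (Nat.zero_le _) le_rfl
    (fun k hk hk0 => by omega) (fun k hk hlk => by omega)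

theorem fold_eq (xs : List Int) (d : Int) (hs : List.Pairwise (· ≤ ·) xs) :
    ∀ (l : List Int) (tr ld : Nat) (s : List (Int × Int)),
      List.Pairwise (· ≤ ·) l →
      (∀ p ∈ l, p ∈ xs) →
      tr ≤ xs.length →
      (∀ p ∈ l, ∀ k (hk : k < xs.length), k < tr → xs[k] < p - d) →
      (∀ p ∈ l, ∀ k (hk : k < xs.length), k < ld → xs[k] < p + d) →
      (l ≠ [] → ld + 1 ≤ xs.length) →
      (l.foldl (pvStepA xs d) (tr, ld, s)).2.2 = l.foldl (pvStepB xs d) s := by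
  intro l
  induction l with
  | nil => intro tr ld s _ _ _ _ _ _; rfl
  | cons p t ih =>
    intro tr ld s hl hmem htr hT hL hne
    have hpxs : p ∈ xs := hmem p List.mem_cons_self
    have hlen : 1 ≤ xs.length := List.length_pos_of_mem hpxs
    have hA1 : lbP xs (p - d) (pvWhileTF xs (p - d) xs.length tr) :=
      pvWhileTF_lbP xs (p - d) hs xs.length tr (by omega) htr (hT p List.mem_cons_self)
    have hB1 : lbP xs (p - d) (pvBisectLeft xs (p - d)) := pvBisectLeft_lbP xs (p - d) hs
    have htr' : pvWhileTF xs (p - d) xs.length tr = pvBisectLeft xs (p - d) :=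
      lbP_unique hA1 hB1
    have hB2 : lbP xs (p + d) (pvBisectLeft xs (p + d)) := pvBisectLeft_lbP xs (p + d) hs
    have hld' : pvWhileLF xs (p + d) xs.length ld = min (pvBisectLeft xs (p + d)) (xs.length - 1) :=
      pvWhileLF_eq xs (p + d) hB2 xs.length ld (by omega) (hne (by simp)) (hL p List.mem_cons_self)
    have hple : ∀ q ∈ t, p ≤ q := fun q hq => List.rel_of_pairwise_cons hl hq
    have hstep : pvStepA xs d (tr, ld, s) p =
        (pvBisectLeft xs (p - d), min (pvBisectLeft xs (p + d)) (xs.length - 1),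
          pvStepB xs d s p) := by
      simp [pvStepA, pvStepB, htr', hld']
    simp only [List.foldl_cons, hstep]
    exact ih _ _ _ hl.of_cons (fun q hq => hmem q (List.mem_cons_of_mem _ hq)) hB1.1
      (fun q hq k hk hkt => lt_of_lt_of_le (hB1.2.1 k hk hkt) (by
        have := hple q hq; omega))
      (fun q hq k hk hkl => lt_of_lt_of_le (hB2.2.1 k hk (by omega)) (by
        have := hple q hq; omega))
      (fun _ => by omega)

-- ===== VERDICT (by name: the statement is the Claim_ definition above) =====
theorem create_ranges_spec : Claim_equal_create_ranges := by
  intro test_p dist_to_run _ hpre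
  unfold Spec_create_ranges create_ranges create_ranges_alt
  exact fold_eq test_p dist_to_run hpre.1 test_p 0 0 [] hpre.1 (fun p hp => hp)
    (Nat.zero_le _) (fun p _ k _ hk => by omega) (fun p _ k _ hk => by omega)
    (fun hne => Nat.succ_le_of_lt (by
      cases test_p with
      | nil => exact absurd rfl hne
      | cons a l => simp))
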